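-- pv_equiv track=rewrite | github.com/kirka00/ege | task_23/11.py | f
-- ===== SOURCE A (Python) =====
-- def f(x, y, command):
-- 	if x > y:
-- 		return 0
-- 	elif x == y:
-- 		return 1
-- 	else:
-- 		if command == 0:
-- 			return f(x + 1, y, 1) + f(x + 2, y, 0) + f(x * 2, y, 0)
-- 		else:
-- 			return f(x + 2, y, 0) + f(x * 2, y, 0)
-- ===== SOURCE B (Python) =====
-- def f(x, y, command):
--     # Bottom-up DP over v = y-1 .. x instead of recursion: each state computed once.
--     g0 = {}
--     g1 = {}
--     def get(d, v):
--         return d.get(v, 1 if v == y else 0)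
--     for v in range(y - 1, x - 1, -1):
--         a = get(g0, v + 2) + get(g0, 2 * v)
--         g1[v] = a
--         g0[v] = get(g1, v + 1) + a
--     return get(g0, x) if command == 0 else get(g1, x)
-- ===== Notes on version B (the rewrite author's own statement) =====
-- stated objective: alternative
-- what changed: Replaced A's exponential three-way recursion by a bottom-up dynamic program that fills two dictionaries (one per command value) for v = y-1 down to x, so each state is computed once; intended as an asymptotic speed-up (A already times out at small y-x where B returns), but a timing run could not measure a ratio, so no speed is claimed.
import Mathlib
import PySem

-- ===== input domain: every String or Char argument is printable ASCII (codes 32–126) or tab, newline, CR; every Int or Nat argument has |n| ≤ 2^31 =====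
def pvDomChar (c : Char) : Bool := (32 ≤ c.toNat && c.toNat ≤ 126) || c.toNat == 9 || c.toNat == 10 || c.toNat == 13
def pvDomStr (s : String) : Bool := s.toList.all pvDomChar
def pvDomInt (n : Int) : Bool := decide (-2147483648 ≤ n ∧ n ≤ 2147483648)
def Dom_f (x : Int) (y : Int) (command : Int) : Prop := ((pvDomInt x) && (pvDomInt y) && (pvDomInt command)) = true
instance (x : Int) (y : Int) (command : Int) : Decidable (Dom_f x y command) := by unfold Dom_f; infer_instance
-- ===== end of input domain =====

-- B replaces A's recursion by a bottom-up DP filling two dicts (one per command) from y-1 down to x.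

-- ===== PORT A =====
-- fuel-guarded transliteration of A's recursion; Pre_f guarantees the fuel (y-x).toNat+1 is never exhausted
def fAux : Nat → Int → Int → Int → Int
  | 0, _, _, _ => 0
  | fuel+1, x, y, command =>
    if x > y then 0
    else if x = y then 1
    else if command = 0 then
      fAux fuel (x + 1) y 1 + fAux fuel (x + 2) y 0 + fAux fuel (x * 2) y 0
    else
      fAux fuel (x + 2) y 0 + fAux fuel (x * 2) y 0

def f (x : Int) (y : Int) (command : Int) : Int := fAux ((y - x).toNat + 1) x y command

-- ===== PORT B =====
-- get(d, v) from Source B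
def bGet (y : Int) (d : PySem.Dict Int Int) (v : Int) : Int := d.getD v (if v = y then 1 else 0)

-- one iteration of Source B's for-loop body, state = (g0, g1)
def bStep (y : Int) (st : PySem.Dict Int Int × PySem.Dict Int Int) (v : Int) :
    PySem.Dict Int Int × PySem.Dict Int Int :=
  let a := bGet y st.1 (v + 2) + bGet y st.1 (2 * v)
  let g1 := st.2.insert v a
  let g0 := st.1.insert v (bGet y g1 (v + 1) + a)
  (g0, g1)

def f_alt (x : Int) (y : Int) (command : Int) : Int :=
  let st := (PySem.List.pyRange (y - 1) (x - 1) (-1)).foldl (bStep y)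
      (PySem.Dict.empty, PySem.Dict.empty)
  if command = 0 then bGet y st.1 x else bGet y st.2 x

-- ===== PRECONDITION & SPEC =====
-- Pre_ excludes x ≤ 0 ∧ x < y, where A's recursion never terminates (RecursionError in Python).
def Pre_f (x : Int) (y : Int) (command : Int) : Prop := 1 ≤ x ∨ y ≤ x
instance (x : Int) (y : Int) (command : Int) : Decidable (Pre_f x y command) := by
  unfold Pre_f; infer_instance

def pvWitness_f : Int × Int × Int := (1, 6, 0)

def Spec_f (x : Int) (y : Int) (command : Int) (out : Int) : Prop := out = f_alt x y command
instance (x : Int) (y : Int) (command : Int) (out : Int) : Decidable (Spec_f x y command out) := by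
  unfold Spec_f; infer_instance

-- ===== CLAIM (what is proved, stated in full; the proofs are below) =====
def Claim_equal_f : Prop := ∀ (x : Int) (y : Int) (command : Int),
  Dom_f x y command → Pre_f x y command → Spec_f x y command (f x y command)

-- ===== LEMMAS AND PROOFS =====

-- fuel does not matter once it exceeds (y - x).toNat, for x ≥ 1
theorem fAux_congr (y : Int) : ∀ (f1 f2 : Nat) (x c : Int), 1 ≤ x →
    (y - x).toNat < f1 → (y - x).toNat < f2 → fAux f1 x y c = fAux f2 x y c := by
  intro f1
  induction f1 with
  | zero => intro f2 x c _ h1 _; omega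
  | succ n ih =>
    intro f2 x c hx h1 h2
    match f2, h2 with
    | m + 1, h2 =>
      simp only [fAux]
      by_cases hgt : x > y
      · simp [hgt]
      · simp only [hgt, if_false]
        by_cases heq : x = y
        · simp [heq]
        · have hlt : x < y := by omega
          simp only [heq, if_false]
          have r1 := ih m (x + 1) 1 (by omega) (by omega) (by omega)
          have r2 := ih m (x + 2) 0 (by omega) (by omega) (by omega)
          have r3 := ih m (x * 2) 0 (by omega) (by omega) (by omega)
          by_cases hc : c = 0 <;> simp [hc, r1, r2, r3]

theorem f_of_ge (x y c : Int) (h : y ≤ x) : f x y c = if x = y then 1 else 0 := by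
  by_cases heq : x = y
  · simp [f, fAux, heq]
  · have : x > y := by omega
    simp [f, fAux, this, heq]

theorem f_rec0 (x y : Int) (hx : 1 ≤ x) (hlt : x < y) :
    f x y 0 = f (x + 1) y 1 + f (x + 2) y 0 + f (x * 2) y 0 := by
  have h1 : ¬ x > y := by omega
  have h2 : x ≠ y := by omega
  show fAux ((y - x).toNat + 1) x y 0 = _
  simp only [fAux, h1, h2, if_false, if_true]
  rw [fAux_congr y ((y - x).toNat) ((y - (x+1)).toNat + 1) (x+1) 1 (by omega) (by omega) (by omega),
      fAux_congr y ((y - x).toNat) ((y - (x+2)).toNat + 1) (x+2) 0 (by omega) (by omega) (by omega),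
      fAux_congr y ((y - x).toNat) ((y - (x*2)).toNat + 1) (x*2) 0 (by omega) (by omega) (by omega)]
  rfl

theorem f_rec1 (x y c : Int) (hx : 1 ≤ x) (hlt : x < y) (hc : c ≠ 0) :
    f x y c = f (x + 2) y 0 + f (x * 2) y 0 := by
  have h1 : ¬ x > y := by omega
  have h2 : x ≠ y := by omega
  show fAux ((y - x).toNat + 1) x y c = _
  simp only [fAux, h1, h2, hc, if_false]
  rw [fAux_congr y ((y - x).toNat) ((y - (x+2)).toNat + 1) (x+2) 0 (by omega) (by omega) (by omega),
      fAux_congr y ((y - x).toNat) ((y - (x*2)).toNat + 1) (x*2) 0 (by omega) (by omega) (by omega)]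
  rfl

-- loop invariant: after processing v = y-1 .. k the two dicts answer bGet correctly for all w ≥ k
def DPInv (y k : Int) (st : PySem.Dict Int Int × PySem.Dict Int Int) : Prop :=
  ∀ w, k ≤ w → bGet y st.1 w = f w y 0 ∧ bGet y st.2 w = f w y 1

def loopTo (y k : Int) : PySem.Dict Int Int × PySem.Dict Int Int :=
  (PySem.List.pyRange (y - 1) (k - 1) (-1)).foldl (bStep y)
    (PySem.Dict.empty, PySem.Dict.empty)

theorem dpinv_base (y : Int) : DPInv y y (PySem.Dict.empty, PySem.Dict.empty) := by
  intro w hw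
  constructor <;>
  · simp only [bGet, PySem.Dict.getD_empty]
    rw [f_of_ge w y _ (by omega)]

theorem loopTo_succ (y k : Int) (hk : k < y) :
    loopTo y k = bStep y (loopTo y (k + 1)) k := by
  unfold loopTo
  have e0 : k + 1 - 1 = k := by ring
  rw [e0, PySem.List.pyRange_neg_one_eq_reverse (y - 1) (k - 1),
      PySem.List.pyRange_neg_one_eq_reverse (y - 1) k]
  have h1 : k - 1 + 1 = k := by ring
  have h2 : y - 1 + 1 = y := by ring
  rw [h1, h2, PySem.List.pyRange_one_cons (by omega : k < y),
      List.reverse_cons, List.foldl_append]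
  rfl

theorem loop_inv (y : Int) : ∀ (n : Nat) (k : Int), k = y - (n : Int) → 1 ≤ k →
    DPInv y k (loopTo y k) := by
  intro n
  induction n with
  | zero =>
    intro k hk _
    have : k = y := by omega
    subst this
    unfold loopTo
    rw [PySem.List.pyRange_neg_one_eq_nil (by omega)]
    exact dpinv_base _
  | succ m ih =>
    intro k hk hk1
    have hky : k < y := by omega
    have IH := ih (k + 1) (by push_cast at hk ⊢; omega) (by omega)
    rw [loopTo_succ y k hky]
    set st := loopTo y (k + 1) with hst
    have h2k : f (2 * k) y 0 = f (k * 2) y 0 := by rw [mul_comm]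
    have ha : bGet y st.1 (k + 2) + bGet y st.1 (2 * k) = f k y 1 := by
      rw [(IH (k + 2) (by omega)).1, (IH (2 * k) (by omega)).1, h2k,
          f_rec1 k y 1 hk1 hky (by omega)]
    intro w hw
    by_cases hwk : w = k
    · subst hwk
      have hb1 := (IH (w + 1) (by omega)).2
      simp only [bGet] at hb1 ha
      constructor
      · simp only [bStep, bGet, PySem.Dict.getD_insert]
        rw [if_pos trivial, if_neg (by omega : (w : Int) + 1 ≠ w), hb1, ha,
            f_rec0 w y hk1 hky, f_rec1 w y 1 hk1 hky (by omega), add_assoc]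
      · simp only [bStep, bGet, PySem.Dict.getD_insert]
        rw [if_pos trivial, ha]
    · have hw1 : k + 1 ≤ w := by omega
      have hb0 := (IH w hw1).1
      have hb1 := (IH w hw1).2
      simp only [bGet] at hb0 hb1
      constructor
      · simp only [bStep, bGet, PySem.Dict.getD_insert]
        rw [if_neg hwk, hb0]
      · simp only [bStep, bGet, PySem.Dict.getD_insert]
        rw [if_neg hwk, hb1]

-- ===== VERDICT (by name: the statement is the Claim_ definition above) =====
theorem f_spec : Claim_equal_f := by
  intro x y command _ hpre
  unfold Spec_f
  by_cases hyx : y ≤ x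
  · -- range empty, both sides are the base cases
    unfold f_alt
    rw [PySem.List.pyRange_neg_one_eq_nil (by omega)]
    simp only [List.foldl_nil]
    rw [f_of_ge x y command hyx]
    have hb : bGet y (PySem.Dict.empty (κ := Int) (ν := Int)) x = if x = y then 1 else 0 := by
      simp [bGet, PySem.Dict.getD_empty]
    by_cases hc : command = 0 <;> simp [hc, hb]
  · have hxy : x < y := by omega
    have hx1 : 1 ≤ x := by rcases hpre with h | h; exact h; omega
    have hDPInv := loop_inv y (y - x).toNat x (by omega) hx1
    unfold f_alt
    have hloop : (PySem.List.pyRange (y - 1) (x - 1) (-1)).foldl (bStep y)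
        (PySem.Dict.empty, PySem.Dict.empty) = loopTo y x := rfl
    rw [hloop]
    by_cases hc : command = 0
    · rw [hc, if_pos rfl, (hDPInv x le_rfl).1]
    · rw [if_neg hc, (hDPInv x le_rfl).2,
          f_rec1 x y command hx1 hxy hc, f_rec1 x y 1 hx1 hxy (by omega)]
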